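-- pv_equiv track=rewrite | github.com/lvalentine6/algorithm_python | programmers/lv3/64062.py | solution
-- ===== SOURCE A (Python) =====
-- def check(stones, k, mid):
--     cnt = 0
--
--     for stone in stones:
--         if stone < mid:
--             cnt += 1
--             if cnt >= k:
--                 return False
--         else:
--             cnt = 0
--
--     return True
--
-- def solution(stones, k):
--     answer = 0
--
--     left = 1
--     right = max(stones)
--
--     while left <= right:
--         mid = (left + right) // 2
--
--         if check(stones, k, mid):
--             left = mid + 1
--         else:
--             right = mid - 1
--
--     answer = right
--
--     return answer
-- ===== SOURCE B (Python) =====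
-- def solution(stones, k):
--     # B: direct scan taking the minimum over all k-windows of the window maximum,
--     # instead of binary-searching with a run-length check; the count of crossers
--     # is clamped at 0 since it cannot be negative.
--     n = len(stones)
--     if k > n:
--         best = max(stones)
--     else:
--         best = max(stones[0:k])
--         for i in range(1, n - k + 1):
--             m = max(stones[i:i + k])
--             if m < best:
--                 best = m
--     return best if best > 0 else 0
-- ===== Notes on version B (the rewrite author's own statement) =====
-- stated objective: simpler
-- what changed: Replaces A's binary search over a run-length check with a direct scan that takes the minimum over all k-windows of the window maximum (clamped at 0), so the search loop and the check helper disappear.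
-- intended difference: On lists whose stones are all negative, A returns max(stones) (a negative number, the untouched upper bound of its search); B returns 0, the intended value since a count of crossing friends cannot be negative. — e.g. on solution([-1], 1): A returns -1, B returns 0
-- outside the precondition, e.g. on solution([2, 3], 0): A returns 2, B raises ValueError; on solution([], 1): A raises ValueError, B raises ValueError
import Mathlib
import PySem

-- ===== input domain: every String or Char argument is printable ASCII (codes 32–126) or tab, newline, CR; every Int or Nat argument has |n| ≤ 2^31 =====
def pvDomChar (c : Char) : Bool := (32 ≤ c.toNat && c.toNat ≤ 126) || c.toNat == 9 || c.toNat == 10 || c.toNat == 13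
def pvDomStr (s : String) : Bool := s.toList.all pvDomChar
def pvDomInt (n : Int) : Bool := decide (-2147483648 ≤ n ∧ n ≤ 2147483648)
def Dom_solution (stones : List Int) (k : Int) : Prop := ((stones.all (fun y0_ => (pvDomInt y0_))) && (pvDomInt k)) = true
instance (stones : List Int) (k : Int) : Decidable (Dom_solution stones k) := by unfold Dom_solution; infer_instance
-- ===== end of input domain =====

-- B replaces A's binary search (over a run-length check) by a direct scan over the k-windows,
-- taking the minimum of the window maxima, clamped at 0; objective: simpler (not claimed faster).

-- ===== PORT A =====
-- check(stones, k, mid): early-return fold carrying the current run length cnt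
def checkGo (k mid : Int) : List Int → Int → Bool
  | [], _ => true
  | s :: rest, cnt =>
    if s < mid then
      if cnt + 1 ≥ k then false
      else checkGo k mid rest (cnt + 1)
    else checkGo k mid rest 0

def check (stones : List Int) (k mid : Int) : Bool := checkGo k mid stones 0

-- while left <= right: binary search loop of A
def bsLoop (stones : List Int) (k left right : Int) : Int :=
  if h : left ≤ right then
    let mid := PySem.Int.floordiv (left + right) 2
    if check stones k mid then bsLoop stones k (mid + 1) right
    else bsLoop stones k left (mid - 1)
  else right
termination_by (right + 1 - left).toNat
decreasing_by
  all_goals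
    have hb := PySem.Int.floordiv_two_mid_bounds h
    omega

def solution (stones : List Int) (k : Int) : Int :=
  -- max(stones): raises on [], excluded by Pre_; getD 0 is never read inside Pre_
  bsLoop stones k 1 ((PySem.List.max? stones id).getD 0)

-- ===== PORT B =====
def solution_alt (stones : List Int) (k : Int) : Int :=
  let n : Int := stones.length
  let best : Int :=
    if k > n then (PySem.List.max? stones id).getD 0
    else
      (PySem.List.pyRange 1 (n - k + 1)).foldl
        (fun best i =>
          let m := (PySem.List.max? (PySem.List.slice stones (some i) (some (i + k))) id).getD 0
          if m < best then m else best)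
        ((PySem.List.max? (PySem.List.slice stones (some 0) (some k)) id).getD 0)
  if best > 0 then best else 0

-- ===== PRECONDITION & SPEC =====
-- Pre_ excludes [] (A's max([]) raises ValueError) and k ≤ 0, which lies outside the natural
-- domain of a crossing count; B itself raises ValueError (max of an empty window) on both.
def Pre_solution (stones : List Int) (k : Int) : Prop := stones ≠ [] ∧ 1 ≤ k
instance (stones : List Int) (k : Int) : Decidable (Pre_solution stones k) := by unfold Pre_solution; infer_instance

def pvWitness_solution : List Int × Int := ([2, 5, 3], 2)

-- When every stone is negative, A returns max(stones) (a negative number, the untouched upper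
-- bound of its search), while B returns 0: a count of crossing friends cannot be negative, so
-- B's value is the intended one.
def D_solution (stones : List Int) (k : Int) : Prop := stones ≠ [] ∧ ∀ x ∈ stones, x < 0
instance (stones : List Int) (k : Int) : Decidable (D_solution stones k) := by unfold D_solution; infer_instance

def Spec_solution (stones : List Int) (k : Int) (out : Int) : Prop := ¬ D_solution stones k → out = solution_alt stones k
instance (stones : List Int) (k : Int) (out : Int) : Decidable (Spec_solution stones k out) := by unfold Spec_solution; infer_instance

def pvDiffWitness_solution : List Int × Int := ([-1], 1)
def pvDiffWitnessOut_solution : Int × Int := (-1, 0)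

-- ===== CLAIM (what is proved, stated in full; the proofs are below) =====
def Claim_unchanged_solution : Prop := ∀ (stones : List Int) (k : Int), Dom_solution stones k → Pre_solution stones k → Spec_solution stones k (solution stones k)
def Claim_changed_solution : Prop := Dom_solution (pvDiffWitness_solution.1) (pvDiffWitness_solution.2) ∧ Pre_solution (pvDiffWitness_solution.1) (pvDiffWitness_solution.2) ∧ D_solution (pvDiffWitness_solution.1) (pvDiffWitness_solution.2) ∧ solution (pvDiffWitness_solution.1) (pvDiffWitness_solution.2) = pvDiffWitnessOut_solution.1 ∧ solution_alt (pvDiffWitness_solution.1) (pvDiffWitness_solution.2) = pvDiffWitnessOut_solution.2 ∧ pvDiffWitnessOut_solution.1 ≠ pvDiffWitnessOut_solution.2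
def Claim_exact_solution : Prop := ∀ (stones : List Int) (k : Int), Dom_solution stones k → Pre_solution stones k → D_solution stones k → solution stones k ≠ solution_alt stones k

-- ===== LEMMAS AND PROOFS =====

lemma foldmin_le_init (f : Int → Int) : ∀ (l : List Int) (init : Int),
    l.foldl (fun b i => if f i < b then f i else b) init ≤ init := by
  intro l
  induction l with
  | nil => intro init; simp
  | cons x t ih =>
    intro init
    simp only [List.foldl_cons]
    by_cases h : f x < init
    · simp only [if_pos h]; exact le_trans (ih _) (le_of_lt h)
    · simp only [if_neg h]; exact ih _

lemma foldmin_lt_iff (f : Int → Int) (mid : Int) : ∀ (l : List Int) (init : Int),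
    (l.foldl (fun b i => if f i < b then f i else b) init < mid ↔
      init < mid ∨ ∃ i ∈ l, f i < mid) := by
  intro l
  induction l with
  | nil => intro init; simp
  | cons x t ih =>
    intro init
    simp only [List.foldl_cons, ih, List.mem_cons]
    constructor
    · rintro (h | ⟨i, hi, hfi⟩)
      · by_cases hx : f x < init
        · simp only [if_pos hx] at h
          exact Or.inr ⟨x, Or.inl rfl, h⟩
        · simp only [if_neg hx] at h
          exact Or.inl h
      · exact Or.inr ⟨i, Or.inr hi, hfi⟩
    · rintro (h | ⟨i, (rfl | hi), hfi⟩)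
      · left; split <;> omega
      · left; split <;> omega
      · exact Or.inr ⟨i, hi, hfi⟩

lemma checkGo_false_iff (k mid : Int) (hk : 1 ≤ k) : ∀ (l : List Int) (cnt : Int), 0 ≤ cnt → cnt < k →
    (checkGo k mid l cnt = false ↔
      ∃ a j : Nat, a + j ≤ l.length ∧
        (∀ x ∈ (l.drop a).take j, x < mid) ∧
        k ≤ (if a = 0 then cnt else 0) + (j : Int)) := by
  intro l
  induction l with
  | nil =>
    intro cnt h0 hck
    simp only [checkGo, List.length_nil]
    constructor
    · intro h; exact absurd h (by simp)
    · rintro ⟨a, j, h1, _, h3⟩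
      have ha : a = 0 := by omega
      have hj : j = 0 := by omega
      subst ha hj
      simp at h3
      omega
  | cons s r ih =>
    intro cnt h0 hck
    simp only [checkGo]
    by_cases hs : s < mid
    · simp only [if_pos hs]
      by_cases hbig : cnt + 1 ≥ k
      · rw [if_pos hbig]
        refine iff_of_true rfl ⟨0, 1, by simp, ?_, by simpa using hbig⟩
        intro x hx
        simp at hx
        simpa [hx] using hs
      · simp only [if_neg hbig]
        rw [ih (cnt + 1) (by omega) (by omega)]
        constructor
        · rintro ⟨a, j, h1, h2, h3⟩
          cases a with
          | zero =>
            refine ⟨0, j + 1, by simp only [List.length_cons]; omega, ?_, ?_⟩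
            · intro x hx
              simp only [List.drop_zero, List.take_succ_cons, List.mem_cons] at hx ⊢
              rcases hx with rfl | hx
              · exact hs
              · exact h2 x (by simpa using hx)
            · simp only [reduceIte] at h3 ⊢
              push_cast at h3 ⊢
              omega
          | succ a' =>
            refine ⟨a' + 2, j, by simp only [List.length_cons]; omega, ?_, ?_⟩
            · intro x hx
              exact h2 x (by simpa using hx)
            · simp only [if_neg (by omega : a' + 1 ≠ 0)] at h3
              simpa using h3
        · rintro ⟨a, j, h1, h2, h3⟩
          cases a with
          | zero =>
            have hj : j ≠ 0 := by
              rintro rfl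
              simp at h3
              omega
            obtain ⟨j', rfl⟩ : ∃ j', j = j' + 1 := ⟨j - 1, by omega⟩
            refine ⟨0, j', by simp at h1; omega, ?_, ?_⟩
            · intro x hx
              exact h2 x (by simp only [List.drop_zero, List.take_succ_cons, List.mem_cons]; exact Or.inr (by simpa using hx))
            · simp only [reduceIte] at h3 ⊢
              push_cast at h3 ⊢
              omega
          | succ a' =>
            refine ⟨a', j, by simp at h1; omega, ?_, ?_⟩
            · intro x hx
              refine h2 x ?_
              simpa using hx
            · simp only [if_neg (by omega : a' + 1 ≠ 0)] at h3
              split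
              · omega
              · exact h3
    · simp only [if_neg hs]
      rw [ih 0 le_rfl (by omega)]
      constructor
      · rintro ⟨a, j, h1, h2, h3⟩
        refine ⟨a + 1, j, by simp only [List.length_cons]; omega, ?_, ?_⟩
        · intro x hx; exact h2 x (by simpa using hx)
        · simp only [if_neg (by omega : a + 1 ≠ 0)]
          split at h3 <;> simpa using h3
      · rintro ⟨a, j, h1, h2, h3⟩
        cases a with
        | zero =>
          exfalso
          have hj : j ≠ 0 := by
            rintro rfl; simp at h3; omega
          have : s < mid := h2 s (by
            obtain ⟨j', rfl⟩ : ∃ j', j = j' + 1 := ⟨j - 1, by omega⟩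
            simp)
          exact hs this
        | succ a' =>
          refine ⟨a', j, by simp at h1; omega, ?_, ?_⟩
          · intro x hx; exact h2 x (by simpa using hx)
          · simp only [if_neg (by omega : a' + 1 ≠ 0)] at h3
            split
            · omega
            · exact h3

lemma check_false_iff (stones : List Int) (k mid : Int) (hk : 1 ≤ k) :
    (check stones k mid = false ↔
      ∃ a : Nat, a + k.toNat ≤ stones.length ∧ ∀ x ∈ (stones.drop a).take k.toNat, x < mid) := by
  rw [check, checkGo_false_iff k mid hk stones 0 le_rfl (by omega)]
  constructor
  · rintro ⟨a, j, h1, h2, h3⟩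
    have hj : k.toNat ≤ j := by split at h3 <;> omega
    refine ⟨a, by omega, ?_⟩
    intro x hx
    refine h2 x ?_
    have : (stones.drop a).take k.toNat = ((stones.drop a).take j).take k.toNat := by
      rw [List.take_take, min_eq_left hj]
    rw [this] at hx
    exact List.take_subset _ _ hx
  · rintro ⟨a, h1, h2⟩
    exact ⟨a, k.toNat, h1, h2, by split <;> omega⟩

lemma checkGo_true_of_short (k mid : Int) : ∀ (l : List Int) (cnt : Int), 0 ≤ cnt →
    cnt + l.length < k → checkGo k mid l cnt = true := by
  intro l
  induction l with
  | nil => intro cnt _ _; rfl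
  | cons s r ih =>
    intro cnt h0 hlen
    simp only [List.length_cons] at hlen
    simp only [checkGo]
    by_cases hs : s < mid
    · rw [if_pos hs, if_neg (by push_cast at hlen ⊢; omega)]
      exact ih (cnt + 1) (by omega) (by push_cast at hlen ⊢; omega)
    · rw [if_neg hs]
      exact ih 0 le_rfl (by push_cast at hlen ⊢; omega)

lemma wmax_lt_iff (w : List Int) (hw : w ≠ []) (mid : Int) :
    ((PySem.List.max? w id).getD 0 < mid ↔ ∀ x ∈ w, x < mid) := by
  obtain ⟨m, hm⟩ : ∃ m, PySem.List.max? w id = some m := by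
    cases h : PySem.List.max? w id with
    | none => exact absurd ((PySem.List.max?_eq_none_iff w id).mp h) hw
    | some m => exact ⟨m, rfl⟩
  rw [hm]
  simp only [Option.getD_some]
  constructor
  · intro h x hx
    exact lt_of_le_of_lt (PySem.List.max?_isMax hm x hx) h
  · intro h
    exact h m (PySem.List.max?_mem hm)

lemma wmax_le_max (stones w : List Int) (hw : w ≠ []) (hsub : ∀ x ∈ w, x ∈ stones) :
    (PySem.List.max? w id).getD 0 ≤ (PySem.List.max? stones id).getD 0 := by
  obtain ⟨m, hm⟩ : ∃ m, PySem.List.max? w id = some m := by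
    cases h : PySem.List.max? w id with
    | none => exact absurd ((PySem.List.max?_eq_none_iff w id).mp h) hw
    | some m => exact ⟨m, rfl⟩
  obtain ⟨M, hM⟩ : ∃ M, PySem.List.max? stones id = some M := by
    cases h : PySem.List.max? stones id with
    | none =>
      rw [PySem.List.max?_eq_none_iff] at h
      subst h
      obtain ⟨x, hx⟩ := List.exists_mem_of_ne_nil w hw
      exact absurd (hsub x hx) (by simp)
    | some M => exact ⟨M, rfl⟩
  rw [hm, hM]
  exact PySem.List.max?_isMax hM m (hsub m (PySem.List.max?_mem hm))

lemma bsLoop_eq (stones : List Int) (k M : Int) (l r : Int) (hlr : l ≤ r + 1)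
    (hthr : ∀ m, l ≤ m → m ≤ r → (check stones k m = true ↔ m ≤ M)) :
    bsLoop stones k l r = max (l - 1) (min M r) := by
  fun_induction bsLoop stones k l r with
  | case1 l r h mid hc ih =>
    have hb := PySem.Int.floordiv_two_mid_bounds h
    have hmid : mid ≤ M := (hthr mid (by omega) (by omega)).mp hc
    rw [ih (by omega) (fun m h1 h2 => hthr m (by omega) (by omega))]
    omega
  | case2 l r h mid hc ih =>
    have hb := PySem.Int.floordiv_two_mid_bounds h
    have hmid : ¬ mid ≤ M := fun hle => hc ((hthr mid (by omega) (by omega)).mpr hle)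
    rw [ih (by omega) (fun m h1 h2 => hthr m (by omega) (by omega))]
    omega
  | case3 l r h =>
    omega


-- the value B clamps: the minimum window maximum (or the list maximum when k exceeds the length)
def bestOf (stones : List Int) (k : Int) : Int :=
  if k > (stones.length : Int) then (PySem.List.max? stones id).getD 0
  else
    (PySem.List.pyRange 1 ((stones.length : Int) - k + 1)).foldl
      (fun b i =>
        if (PySem.List.max? (PySem.List.slice stones (some i) (some (i + k))) id).getD 0 < b
        then (PySem.List.max? (PySem.List.slice stones (some i) (some (i + k))) id).getD 0 else b)
      ((PySem.List.max? (PySem.List.slice stones (some 0) (some k)) id).getD 0)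

lemma alt_eq (stones : List Int) (k : Int) :
    solution_alt stones k = max 0 (bestOf stones k) := by
  show (if bestOf stones k > 0 then bestOf stones k else 0) = max 0 (bestOf stones k)
  split <;> omega

lemma slice_window (stones : List Int) (k i : Int) (hi : 0 ≤ i) (hk : 0 ≤ k) :
    PySem.List.slice stones (some i) (some (i + k)) = (stones.drop i.toNat).take k.toNat := by
  rw [PySem.List.slice_toNat stones hi (by omega)]
  congr 1
  omega

lemma window_ne_nil (stones : List Int) (kk a : Nat) (h1 : 1 ≤ kk) (h2 : a + kk ≤ stones.length) :
    (stones.drop a).take kk ≠ [] := by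
  apply List.ne_nil_of_length_pos
  simp only [List.length_take, List.length_drop]
  omega

lemma bestOf_lt_iff (stones : List Int) (k : Int) (hk : 1 ≤ k) (hkn : k ≤ (stones.length : Int))
    (mid : Int) :
    (bestOf stones k < mid ↔
      ∃ a : Nat, a + k.toNat ≤ stones.length ∧ ∀ x ∈ (stones.drop a).take k.toNat, x < mid) := by
  rw [bestOf, if_neg (by omega)]
  rw [foldmin_lt_iff
    (fun i => (PySem.List.max? (PySem.List.slice stones (some i) (some (i + k))) id).getD 0) mid]
  constructor
  · rintro (h0 | ⟨i, hi, hfi⟩)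
    · refine ⟨0, by omega, ?_⟩
      rw [PySem.List.slice_toNat stones le_rfl (by omega)] at h0
      simp only [Int.toNat_zero, Nat.sub_zero, List.drop_zero] at h0
      exact (wmax_lt_iff _ (by simpa using window_ne_nil stones k.toNat 0 (by omega) (by omega)) mid).mp h0
    · rw [PySem.List.mem_pyRange_one] at hi
      refine ⟨i.toNat, by omega, ?_⟩
      rw [slice_window stones k i (by omega) (by omega)] at hfi
      exact (wmax_lt_iff _ (window_ne_nil stones k.toNat i.toNat (by omega) (by omega)) mid).mp hfi
  · rintro ⟨a, ha, hall⟩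
    cases Nat.eq_zero_or_pos a with
    | inl h0 =>
      subst h0
      left
      rw [PySem.List.slice_toNat stones le_rfl (by omega)]
      simp only [Int.toNat_zero, Nat.sub_zero, List.drop_zero]
      exact (wmax_lt_iff _ (by simpa using window_ne_nil stones k.toNat 0 (by omega) (by omega)) mid).mpr
        (by simpa using hall)
    | inr hpos =>
      right
      refine ⟨(a : Int), ?_, ?_⟩
      · rw [PySem.List.mem_pyRange_one]; omega
      · rw [slice_window stones k (a : Int) (by omega) (by omega)]
        simp only [Int.toNat_natCast]
        exact (wmax_lt_iff _ (window_ne_nil stones k.toNat a (by omega) (by omega)) mid).mpr hall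

lemma check_threshold (stones : List Int) (k : Int) (hk : 1 ≤ k) (hkn : k ≤ (stones.length : Int))
    (m : Int) : (check stones k m = true ↔ m ≤ bestOf stones k) := by
  rw [← Bool.not_eq_false, check_false_iff stones k m hk]
  rw [← bestOf_lt_iff stones k hk hkn m]
  omega

lemma bestOf_le_max (stones : List Int) (k : Int) (hk : 1 ≤ k) (hkn : k ≤ (stones.length : Int)) :
    bestOf stones k ≤ (PySem.List.max? stones id).getD 0 := by
  rw [bestOf, if_neg (by omega)]
  refine le_trans (foldmin_le_init
    (fun i => (PySem.List.max? (PySem.List.slice stones (some i) (some (i + k))) id).getD 0) _ _) ?_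
  apply wmax_le_max
  · rw [PySem.List.slice_toNat stones le_rfl (by omega)]
    simpa using window_ne_nil stones k.toNat 0 (by omega) (by omega)
  · intro x hx
    exact PySem.List.mem_of_mem_slice stones _ _ hx

lemma max_getD_nonneg (stones : List Int) (x : Int) (hx : x ∈ stones) (h0 : 0 ≤ x) :
    0 ≤ (PySem.List.max? stones id).getD 0 := by
  cases h : PySem.List.max? stones id with
  | none =>
    rw [PySem.List.max?_eq_none_iff] at h
    subst h
    exact absurd hx (by simp)
  | some m =>
    simpa using le_trans h0 (PySem.List.max?_isMax h x hx)

lemma max_getD_neg (stones : List Int) (hne : stones ≠ []) (hneg : ∀ x ∈ stones, x < 0) :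
    (PySem.List.max? stones id).getD 0 < 0 := by
  cases h : PySem.List.max? stones id with
  | none => exact absurd ((PySem.List.max?_eq_none_iff stones id).mp h) hne
  | some m => simpa using hneg m (PySem.List.max?_mem h)

-- ===== VERDICT (by name: the statement is the Claim_ definition above) =====
theorem solution_spec : Claim_unchanged_solution := by
  intro stones k _ hpre hnd
  obtain ⟨hne, hk⟩ := hpre
  have hR0 : 0 ≤ (PySem.List.max? stones id).getD 0 := by
    unfold D_solution at hnd
    simp only [not_and, not_forall, not_lt] at hnd
    obtain ⟨x, hx, hx0⟩ := hnd hne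
    exact max_getD_nonneg stones x hx hx0
  show bsLoop stones k 1 ((PySem.List.max? stones id).getD 0) = solution_alt stones k
  rw [alt_eq]
  by_cases hkn : k > (stones.length : Int)
  · rw [bestOf, if_pos hkn]
    rw [bsLoop_eq stones k ((PySem.List.max? stones id).getD 0) 1 _ (by omega) ?thr]
    · omega
    case thr =>
      intro m h1 h2
      refine ⟨fun _ => h2, fun _ => ?_⟩
      exact checkGo_true_of_short k m stones 0 le_rfl (by simpa using hkn)
  · have hkn' : k ≤ (stones.length : Int) := by omega
    rw [bsLoop_eq stones k (bestOf stones k) 1 _ (by omega)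
      (fun m _ _ => check_threshold stones k hk hkn' m)]
    have := bestOf_le_max stones k hk hkn'
    omega

theorem solution_changed : Claim_changed_solution := by
  unfold Claim_changed_solution
  refine ⟨by decide, by decide, by decide, ?_, by decide, by decide⟩
  show solution [-1] 1 = -1
  rw [solution, bsLoop.eq_def]
  norm_num [PySem.List.max?]

theorem solution_tight : Claim_exact_solution := by
  intro stones k _ hpre hd
  obtain ⟨hne, hk⟩ := hpre
  obtain ⟨_, hneg⟩ := hd
  have hR0 : (PySem.List.max? stones id).getD 0 < 0 := max_getD_neg stones hne hneg
  have hA : solution stones k = (PySem.List.max? stones id).getD 0 := by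
    rw [solution, bsLoop.eq_def, dif_neg (by omega)]
  have hB : 0 ≤ solution_alt stones k := by
    rw [alt_eq]
    omega
  omega
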